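-- pv_equiv track=rewrite | github.com/deeptis36/pythonResearch | resume_parser_effort/education.py | extract_education_section
-- ===== SOURCE A (Python) =====
-- def extract_education_section(text):
--     text_array = text.split("\n")
--     start_capture = False
--     section = []
--     education_records = []
--
--     # Keywords to identify the education section (case-insensitive)
--     education_keywords = [
--         "EDUCATION", "EDUCATIONS", "ACADEMIC DETAILS", "ACADEMY",
--         "ACADEMICS", "QUALIFICATIONS", "QUALIFICATION", "ACADEMIC BACKGROUND",
--         "EDUCATIONAL BACKGROUND", "EDUCATIONAL HISTORY", "SCHOOLING", "UNIVERSITY",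
--         "COLLEGE", "COURSEWORK", "STUDIES", "DEGREE", "DEGREES",
--         "ACADEMIC QUALIFICATIONS", "ACADEMIC RECORD", "CREDENTIALS",
--         "CERTIFICATIONS", "ACADEMIC ACHIEVEMENTS", "EDUCATION HISTORY",
--         "EDUCATIONAL QUALIFICATIONS", "EDUCATIONAL PROFILE"
--     ]
--
--     # Keywords that indicate a different section is starting
--     other_sections = [
--         "EXPERIENCE", "EXPERIENCES", "WORK EXPERIENCE", "WORK EXPERIENCES",
--         "PROFESSIONAL EXPERIENCE", "PROFESSIONAL EXPERIENCES", "PROJECTS","PROJECT",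
--     ]
--
--     # Iterate through each line in the text array
--     for line in text_array:
--         # Check if the line contains any of the education keywords (case-insensitive)
--         if any(keyword in line.upper() for keyword in education_keywords):
--             start_capture = True
--
--         # Check if the line contains any of the other section keywords to stop capturing
--         if any(keyword in line.upper() for keyword in other_sections):
--             if start_capture:
--                 break  # Stop capturing if we're in the education section and another section starts
--             start_capture = False
--
--         # Capture the line if we are in the education section
--         if start_capture:
--
--             section.append(line.strip())
--             section.append("###")
--
--     # Return the captured lines as a single string
--     return section
-- ===== SOURCE B (Python) =====
-- EDUCATION_KEYWORDS = [
--     "EDUCATION", "EDUCATIONS", "ACADEMIC DETAILS", "ACADEMY",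
--     "ACADEMICS", "QUALIFICATIONS", "QUALIFICATION", "ACADEMIC BACKGROUND",
--     "EDUCATIONAL BACKGROUND", "EDUCATIONAL HISTORY", "SCHOOLING", "UNIVERSITY",
--     "COLLEGE", "COURSEWORK", "STUDIES", "DEGREE", "DEGREES",
--     "ACADEMIC QUALIFICATIONS", "ACADEMIC RECORD", "CREDENTIALS",
--     "CERTIFICATIONS", "ACADEMIC ACHIEVEMENTS", "EDUCATION HISTORY",
--     "EDUCATIONAL QUALIFICATIONS", "EDUCATIONAL PROFILE"
-- ]
--
-- OTHER_SECTIONS = [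
--     "EXPERIENCE", "EXPERIENCES", "WORK EXPERIENCE", "WORK EXPERIENCES",
--     "PROFESSIONAL EXPERIENCE", "PROFESSIONAL EXPERIENCES", "PROJECTS", "PROJECT",
-- ]
--
--
-- def _is_education_heading(line):
--     up = line.upper()
--     return any(k in up for k in EDUCATION_KEYWORDS)
--
--
-- def _is_other_heading(line):
--     up = line.upper()
--     return any(k in up for k in OTHER_SECTIONS)
--
--
-- def extract_education_section(text):
--     lines = text.split("\n")
--
--     # Phase 1: index of the first line mentioning an education keyword.
--     start = None
--     for i, line in enumerate(lines):
--         if _is_education_heading(line):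
--             start = i
--             break
--     if start is None:
--         return []
--
--     # Phase 2: first index >= start whose line mentions another section.
--     end = len(lines)
--     for i in range(start, len(lines)):
--         if _is_other_heading(lines[i]):
--             end = i
--             break
--
--     # The section is the slice between the two indices.
--     return [piece for line in lines[start:end] for piece in (line.strip(), "###")]
-- ===== Notes on version B (the rewrite author's own statement) =====
-- stated objective: alternative
-- what changed: Replaced A's single pass with a running start_capture flag and in-loop break by a two-phase index computation (first education-keyword line index, then first other-section line index at or after it) followed by building the output from the slice between them.
import Mathlib
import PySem

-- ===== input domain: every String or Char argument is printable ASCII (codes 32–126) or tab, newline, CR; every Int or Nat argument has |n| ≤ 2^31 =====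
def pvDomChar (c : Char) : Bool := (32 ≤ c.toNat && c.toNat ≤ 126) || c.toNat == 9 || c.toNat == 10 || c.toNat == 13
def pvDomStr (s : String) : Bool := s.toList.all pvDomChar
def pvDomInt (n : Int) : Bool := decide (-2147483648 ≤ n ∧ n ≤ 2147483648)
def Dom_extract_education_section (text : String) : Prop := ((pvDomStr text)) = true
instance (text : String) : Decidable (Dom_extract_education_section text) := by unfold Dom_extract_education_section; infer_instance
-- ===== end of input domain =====

-- B replaces A's flag-driven single loop by a two-phase index scan (find start, find end, slice); objective: simpler decomposition, same cost.

-- ===== PORT A =====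
def pvEduKeywords : List String := [
  "EDUCATION", "EDUCATIONS", "ACADEMIC DETAILS", "ACADEMY",
  "ACADEMICS", "QUALIFICATIONS", "QUALIFICATION", "ACADEMIC BACKGROUND",
  "EDUCATIONAL BACKGROUND", "EDUCATIONAL HISTORY", "SCHOOLING", "UNIVERSITY",
  "COLLEGE", "COURSEWORK", "STUDIES", "DEGREE", "DEGREES",
  "ACADEMIC QUALIFICATIONS", "ACADEMIC RECORD", "CREDENTIALS",
  "CERTIFICATIONS", "ACADEMIC ACHIEVEMENTS", "EDUCATION HISTORY",
  "EDUCATIONAL QUALIFICATIONS", "EDUCATIONAL PROFILE"]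

def pvOtherKeywords : List String := [
  "EXPERIENCE", "EXPERIENCES", "WORK EXPERIENCE", "WORK EXPERIENCES",
  "PROFESSIONAL EXPERIENCE", "PROFESSIONAL EXPERIENCES", "PROJECTS", "PROJECT"]

-- any(keyword in line.upper() for keyword in …)
def pvIsEdu (line : String) : Bool :=
  pvEduKeywords.any (fun k => PySem.Str.isIn k (PySem.Str.upper line))

def pvIsOther (line : String) : Bool :=
  pvOtherKeywords.any (fun k => PySem.Str.isIn k (PySem.Str.upper line))

-- A's for-loop over the lines, carrying the start_capture flag; the break returns
-- the section accumulated so far (here: stop consing).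
def pvLoopA : List String → Bool → List String
  | [], _ => []
  | l :: ls, cap =>
    let cap1 := if pvIsEdu l then true else cap
    if pvIsOther l then
      (if cap1 then [] else pvLoopA ls cap1)
    else
      if cap1 then PySem.Str.strip l :: "###" :: pvLoopA ls cap1
      else pvLoopA ls cap1

def extract_education_section (text : String) : List String :=
  pvLoopA ((PySem.Str.split? text "\n").getD []) false

-- ===== PORT B =====
-- phase 1: index of the first line mentioning an education keyword
def pvFindStart : List String → Nat → Option Nat
  | [], _ => none
  | l :: ls, i => if pvIsEdu l then some i else pvFindStart ls (i + 1)

-- phase 2: the 'for i in range(start, len(lines))' loop, walking the suffix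
def pvFindEnd : List String → Nat → Nat
  | [], i => i
  | l :: ls, i => if pvIsOther l then i else pvFindEnd ls (i + 1)

def extract_education_section_alt (text : String) : List String :=
  let lines := (PySem.Str.split? text "\n").getD []
  match pvFindStart lines 0 with
  | none => []
  | some s =>
    let e := pvFindEnd (lines.drop s) s
    (PySem.List.slice lines (some (s : Int)) (some (e : Int))).flatMap
      (fun l => [PySem.Str.strip l, "###"])

-- ===== PRECONDITION & SPEC =====
def Spec_extract_education_section (text : String) (out : List String) : Prop := out = extract_education_section_alt text
instance (text : String) (out : List String) : Decidable (Spec_extract_education_section text out) := by unfold Spec_extract_education_section; infer_instance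

-- ===== CLAIM (what is proved, stated in full; the proofs are below) =====
def Claim_equal_extract_education_section : Prop := ∀ (text : String), Dom_extract_education_section text → Spec_extract_education_section text (extract_education_section text)

-- ===== LEMMAS AND PROOFS =====

-- the capture phase: strip/### every line until the first other-section line
def pvCollect : List String → List String
  | [] => []
  | l :: ls => if pvIsOther l then [] else PySem.Str.strip l :: "###" :: pvCollect ls

-- clean structural form of A: skip to the first education line, then collect
def pvGo : List String → List String
  | [] => []
  | l :: ls => if pvIsEdu l then pvCollect (l :: ls) else pvGo ls

theorem pvLoopA_true (ls : List String) : pvLoopA ls true = pvCollect ls := by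
  induction ls with
  | nil => rfl
  | cons l ls ih =>
    simp only [pvLoopA, pvCollect]
    cases h : pvIsEdu l <;> simp [ih]

theorem pvLoopA_false (ls : List String) : pvLoopA ls false = pvGo ls := by
  induction ls with
  | nil => rfl
  | cons l ls ih =>
    simp only [pvLoopA, pvGo]
    cases h : pvIsEdu l
    · simpa using ih
    · simp [pvLoopA_true, pvCollect]

theorem pvFindStart_shift (ls : List String) (i : Nat) :
    pvFindStart ls i = (pvFindStart ls 0).map (· + i) := by
  induction ls generalizing i with
  | nil => rfl
  | cons l ls ih =>
    cases h : pvIsEdu l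
    · simp only [pvFindStart, h, Bool.false_eq_true, if_false]
      rw [ih (i + 1), ih 1]
      cases pvFindStart ls 0 with
      | none => rfl
      | some a => simp; omega
    · simp [pvFindStart, h]

theorem pvGo_of_findStart_none (ls : List String) (h : pvFindStart ls 0 = none) :
    pvGo ls = [] := by
  induction ls with
  | nil => rfl
  | cons l ls ih =>
    cases he : pvIsEdu l
    · simp only [pvFindStart, he, Bool.false_eq_true, if_false] at h
      rw [pvFindStart_shift] at h
      simp only [pvGo, he, Bool.false_eq_true, if_false]
      exact ih (by cases hx : pvFindStart ls 0 <;> simp [hx] at h ⊢)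
    · simp [pvFindStart, he] at h

theorem pvGo_of_findStart_some (ls : List String) (s : Nat)
    (h : pvFindStart ls 0 = some s) : pvGo ls = pvCollect (ls.drop s) := by
  induction ls generalizing s with
  | nil => simp [pvFindStart] at h
  | cons l ls ih =>
    cases he : pvIsEdu l
    · simp only [pvFindStart, he, Bool.false_eq_true, if_false] at h
      rw [pvFindStart_shift] at h
      simp only [pvGo, he, Bool.false_eq_true, if_false]
      cases hx : pvFindStart ls 0 with
      | none => simp [hx] at h
      | some s' =>
        simp only [hx, Option.map_some] at h
        obtain rfl : s = s' + 1 := by injection h with h; omega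
        simp [ih s' hx]
    · simp only [pvFindStart, he, if_true] at h
      obtain rfl : s = 0 := by injection h with h; omega
      simp [pvGo, pvCollect, he]

theorem pvFindEnd_eq (ls : List String) (i : Nat) :
    pvFindEnd ls i = i + (ls.takeWhile (fun l => !pvIsOther l)).length := by
  induction ls generalizing i with
  | nil => simp [pvFindEnd]
  | cons l ls ih =>
    cases h : pvIsOther l
    · simp [pvFindEnd, List.takeWhile, h, ih (i + 1)]; omega
    · simp [pvFindEnd, List.takeWhile, h]

theorem pvCollect_eq (ls : List String) :
    pvCollect ls = (ls.takeWhile (fun l => !pvIsOther l)).flatMap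
      (fun l => [PySem.Str.strip l, "###"]) := by
  induction ls with
  | nil => rfl
  | cons l ls ih =>
    simp only [pvCollect, List.takeWhile]
    cases h : pvIsOther l <;> simp [ih]

theorem pvKey (L : List String) :
    pvLoopA L false =
      (match pvFindStart L 0 with
       | none => []
       | some s =>
         (PySem.List.slice L (some (s : Int)) (some ((pvFindEnd (L.drop s) s : Nat) : Int))).flatMap
           (fun l => [PySem.Str.strip l, "###"])) := by
  rw [pvLoopA_false]
  cases h : pvFindStart L 0 with
  | none => exact pvGo_of_findStart_none L h
  | some s =>
    dsimp only
    rw [pvGo_of_findStart_some L s h]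
    rw [pvFindEnd_eq, PySem.List.slice_natCast]
    have hpref : (L.drop s).takeWhile (fun l => !pvIsOther l) <+: L.drop s :=
      List.takeWhile_prefix _
    rw [show s + ((L.drop s).takeWhile (fun l => !pvIsOther l)).length - s
          = ((L.drop s).takeWhile (fun l => !pvIsOther l)).length by omega]
    rw [List.prefix_iff_eq_take.mp hpref |>.symm]
    exact pvCollect_eq _

-- ===== VERDICT (by name: the statement is the Claim_ definition above) =====
theorem extract_education_section_spec : Claim_equal_extract_education_section := by
  intro text _
  unfold Spec_extract_education_section extract_education_section extract_education_section_alt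
  exact pvKey _
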